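-- pv_equiv track=rewrite | github.com/Mashi007/pagos | backend/app/utils/cliente_emails.py | algun_email_coincide
-- ===== SOURCE A (Python) =====
-- from typing import Iterable, List, Optional, Sequence
--
-- def _norm_email(s: Optional[str]) -> str:
--     return (s or "").strip()
--
-- def algun_email_coincide(emails_buscar: Iterable[str], email_bd: Optional[str], email_sec_bd: Optional[str]) -> bool:
--     """True si algún email de la lista coincide con correo 1 o correo 2 en BD (trim, lower)."""
--     cand = {_norm_email(x).lower() for x in emails_buscar if _norm_email(x) and "@" in _norm_email(x)}
--     if not cand:
--         return False
--     for stored in (email_bd, email_sec_bd):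
--         t = _norm_email(stored).lower()
--         if t and t in cand:
--             return True
--     return False
-- ===== SOURCE B (Python) =====
-- from typing import Iterable, Optional
--
-- def _norm_email(s: Optional[str]) -> str:
--     return (s or "").strip()
--
-- def algun_email_coincide(emails_buscar: Iterable[str], email_bd: Optional[str], email_sec_bd: Optional[str]) -> bool:
--     """True si algún email de la lista coincide con correo 1 o correo 2 en BD (trim, lower)."""
--     targets = {t for t in (_norm_email(email_bd).lower(), _norm_email(email_sec_bd).lower()) if t}
--     for x in emails_buscar:
--         n = _norm_email(x)
--         if n and "@" in n and n.lower() in targets: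
--             return True
--     return False
-- ===== Notes on version B (the rewrite author's own statement) =====
-- stated objective: alternative
-- what changed: Instead of materializing a set of all normalized candidate emails and then probing it with the two stored emails, B builds a 2-element target set from the stored emails and scans the input once with early exit on the first match.
import Mathlib
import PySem

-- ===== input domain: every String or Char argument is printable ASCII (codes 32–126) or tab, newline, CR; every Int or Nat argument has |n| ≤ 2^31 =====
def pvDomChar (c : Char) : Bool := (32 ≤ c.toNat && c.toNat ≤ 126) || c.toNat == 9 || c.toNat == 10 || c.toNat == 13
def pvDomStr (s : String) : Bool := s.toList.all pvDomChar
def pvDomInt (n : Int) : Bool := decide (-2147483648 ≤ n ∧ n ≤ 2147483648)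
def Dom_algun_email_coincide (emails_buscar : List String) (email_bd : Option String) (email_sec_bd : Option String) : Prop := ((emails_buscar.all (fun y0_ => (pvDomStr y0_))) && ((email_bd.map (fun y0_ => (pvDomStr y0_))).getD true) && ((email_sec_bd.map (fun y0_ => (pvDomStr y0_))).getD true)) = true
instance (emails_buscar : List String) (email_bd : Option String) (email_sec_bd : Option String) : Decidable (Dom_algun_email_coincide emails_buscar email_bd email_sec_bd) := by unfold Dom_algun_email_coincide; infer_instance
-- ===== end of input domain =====

-- B checks each input email against a 2-element target set built from the stored emails (single pass,
-- early exit) instead of materializing a set over all input emails and probing it with the stored ones.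

-- ===== PORT A =====
-- _norm_email(s) = (s or "").strip(); "" is falsy so (s or "") = s.getD "" on Option String
def pvNormEmail (s : Option String) : String := PySem.Str.strip (s.getD "")

def algun_email_coincide (emails_buscar : List String) (email_bd : Option String) (email_sec_bd : Option String) : Bool :=
  -- cand = {_norm_email(x).lower() for x in emails_buscar if _norm_email(x) and "@" in _norm_email(x)}
  let cand : PySem.Set String :=
    PySem.Set.ofList ((emails_buscar.filter (fun x =>
        decide (pvNormEmail (some x) ≠ "") && PySem.Str.isIn "@" (pvNormEmail (some x)))).map
      (fun x => PySem.Str.lower (pvNormEmail (some x))))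
  if cand.isEmpty then false
  else
    -- for stored in (email_bd, email_sec_bd): … return True on first hit, else False
    [email_bd, email_sec_bd].any (fun stored =>
      let t := PySem.Str.lower (pvNormEmail stored)
      decide (t ≠ "") && cand.contains t)

-- ===== PORT B =====
def algun_email_coincide_alt (emails_buscar : List String) (email_bd : Option String) (email_sec_bd : Option String) : Bool :=
  -- targets = {t for t in (_norm_email(email_bd).lower(), _norm_email(email_sec_bd).lower()) if t}
  let targets : PySem.Set String :=
    PySem.Set.ofList (([email_bd, email_sec_bd].map (fun s => PySem.Str.lower (pvNormEmail s))).filter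
      (fun t => decide (t ≠ "")))
  -- single pass with early exit (List.any short-circuits like the for-loop's return True)
  emails_buscar.any (fun x =>
    let n := pvNormEmail (some x)
    decide (n ≠ "") && PySem.Str.isIn "@" n && targets.contains (PySem.Str.lower n))

-- ===== PRECONDITION & SPEC =====
def Spec_algun_email_coincide (emails_buscar : List String) (email_bd : Option String) (email_sec_bd : Option String) (out : Bool) : Prop := out = algun_email_coincide_alt emails_buscar email_bd email_sec_bd
instance (emails_buscar : List String) (email_bd : Option String) (email_sec_bd : Option String) (out : Bool) : Decidable (Spec_algun_email_coincide emails_buscar email_bd email_sec_bd out) := by unfold Spec_algun_email_coincide; infer_instance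

-- ===== CLAIM (what is proved, stated in full; the proofs are below) =====
def Claim_equal_algun_email_coincide : Prop := ∀ (emails_buscar : List String) (email_bd : Option String) (email_sec_bd : Option String), Dom_algun_email_coincide emails_buscar email_bd email_sec_bd → Spec_algun_email_coincide emails_buscar email_bd email_sec_bd (algun_email_coincide emails_buscar email_bd email_sec_bd)

-- ===== LEMMAS AND PROOFS =====

-- Both sides are true exactly when some input email is valid (non-empty, contains '@') and its
-- lowercase normalization equals the non-empty lowercase normalization of a stored email.
set_option maxHeartbeats 1000000 in
theorem algun_email_coincide_eq_alt (emails_buscar : List String) (email_bd : Option String) (email_sec_bd : Option String) :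
    algun_email_coincide emails_buscar email_bd email_sec_bd
      = algun_email_coincide_alt emails_buscar email_bd email_sec_bd := by
  unfold algun_email_coincide algun_email_coincide_alt
  rw [Bool.eq_iff_iff]
  simp only [List.any_eq_true, PySem.Set.contains_eq_listContains, List.contains_eq_mem,
    PySem.Set.mem_ofList, List.mem_map, List.mem_filter, Bool.and_eq_true, decide_eq_true_eq,
    List.mem_cons, List.not_mem_nil, or_false]
  split_ifs with he
  · rw [List.isEmpty_iff] at he
    constructor
    · simp
    · rintro ⟨x, hx, ⟨hne, hat⟩, -, -⟩
      exfalso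
      have hmem : PySem.Str.lower (pvNormEmail (some x)) ∈
          (PySem.Set.ofList ((emails_buscar.filter (fun x =>
            decide (pvNormEmail (some x) ≠ "") && PySem.Str.isIn "@" (pvNormEmail (some x)))).map
          (fun x => PySem.Str.lower (pvNormEmail (some x))))) := by
        rw [PySem.Set.mem_ofList]
        exact List.mem_map_of_mem (List.mem_filter.mpr ⟨hx, by simp only [Bool.and_eq_true, decide_eq_true_eq]; exact ⟨hne, hat⟩⟩)
      rw [he] at hmem
      simp at hmem
  · simp only [List.any_eq_true, Bool.and_eq_true, decide_eq_true_eq, PySem.Set.mem_ofList,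
      List.mem_map, List.mem_filter, List.mem_cons, List.not_mem_nil, or_false]
    constructor
    · rintro ⟨stored, hs, ht, x, ⟨hx, hne, hat⟩, hlx⟩
      exact ⟨x, hx, ⟨hne, hat⟩, ⟨stored, hs, hlx.symm⟩, by rw [hlx]; exact ht⟩
    · rintro ⟨x, hx, ⟨hne, hat⟩, ⟨a, ha, hla⟩, hlt⟩
      exact ⟨a, ha, by rw [hla]; exact hlt, x, ⟨hx, hne, hat⟩, hla.symm⟩

-- ===== VERDICT (by name: the statement is the Claim_ definition above) =====
theorem algun_email_coincide_spec : Claim_equal_algun_email_coincide := by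
  intro e b s _
  exact algun_email_coincide_eq_alt e b s
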